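-- pv_equiv track=rewrite | github.com/robrogers3/python-tests | challenges/graphs.py | find_all_parents
-- ===== SOURCE A (Python) =====
-- import collections
--
-- def find_all_parents(G, s):
--     Q = [s]
--     parents = collections.defaultdict(set)
--     while len(Q) != 0:
--         v = Q[0]
--         Q.pop(0)
--         for w in G.get(v, []):
--             parents[w].add(v)
--             Q.append(w)
--     return parents
-- ===== SOURCE B (Python) =====
-- import collections
--
-- def find_all_parents(G, s):
--     # Stage 1: list the nodes reachable from s in BFS processing order
--     # (visited set => each reachable node appears exactly once).
--     order = []
--     seen = set()
--     queue = collections.deque([s])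
--     while queue:
--         v = queue.popleft()
--         if v not in seen:
--             seen.add(v)
--             order.append(v)
--             queue.extend(G.get(v, []))
--     # Stage 2: one dict-building pass over that order.
--     parents = collections.defaultdict(set)
--     for v in order:
--         for w in G.get(v, []):
--             parents[w].add(v)
--     return parents
-- ===== Notes on version B (the rewrite author's own statement) =====
-- stated objective: alternative
-- what changed: A re-enqueues every neighbour on every pop with no visited set (enumerating walks from s; nonterminating on a reachable cycle); B first computes the BFS order of reachable nodes with a visited set and deque, then builds the parents dict in a second pass over that order, touching each reachable node once.
import Mathlib
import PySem

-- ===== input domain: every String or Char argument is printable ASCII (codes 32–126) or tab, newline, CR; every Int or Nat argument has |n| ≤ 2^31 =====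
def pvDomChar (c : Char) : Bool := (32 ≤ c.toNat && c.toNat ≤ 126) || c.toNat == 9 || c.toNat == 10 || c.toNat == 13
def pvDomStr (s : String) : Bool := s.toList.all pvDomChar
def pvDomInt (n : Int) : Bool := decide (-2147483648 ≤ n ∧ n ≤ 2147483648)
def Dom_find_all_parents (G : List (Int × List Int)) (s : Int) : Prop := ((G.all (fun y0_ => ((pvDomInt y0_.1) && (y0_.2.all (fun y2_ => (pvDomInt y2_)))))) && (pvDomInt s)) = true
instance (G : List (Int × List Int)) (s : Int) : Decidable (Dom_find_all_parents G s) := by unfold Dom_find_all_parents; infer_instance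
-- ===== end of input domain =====

-- B replaces A's walk-enumerating queue loop (one pop per walk from s, no visited set,
-- never terminating when a cycle is reachable) by two stages: a visited-set BFS that
-- lists each reachable node once in processing order, then a single dict-building
-- pass over that order.

-- `G.get(v, [])` — shared dictionary lookup of both Pythons
def pvAdj (G : List (Int × List Int)) (v : Int) : List Int :=
  PySem.Dict.getD (PySem.Dict.mk G) v []

-- total edge count of G; the fuel below bounds A's pops when the reachable part is acyclic
def pvE (G : List (Int × List Int)) : Nat := (G.map (fun q => q.2.length)).sum
def pvK (G : List (Int × List Int)) : Nat := pvE G + 2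
def pvFuel (G : List (Int × List Int)) : Nat := pvK G ^ (pvK G + 2)

-- ===== PORT A =====
-- `for w in G.get(v, []): parents[w].add(v)` (defaultdict(set): `parents[w]` defaults to ∅)
def pvUpd (G : List (Int × List Int)) (p : PySem.Dict Int (PySem.Set Int)) (v : Int) :
    PySem.Dict Int (PySem.Set Int) :=
  (pvAdj G v).foldl (fun p w => p.modify w PySem.Set.empty (fun S => PySem.Set.add S v)) p

-- `while len(Q) != 0: v = Q[0]; Q.pop(0); for w in G.get(v,[]): parents[w].add(v); Q.append(w)`
-- (fuel makes the while-loop total; under Pre_ the queue empties before the fuel runs out)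
def pvLoopA (G : List (Int × List Int)) :
    Nat → List Int → PySem.Dict Int (PySem.Set Int) → PySem.Dict Int (PySem.Set Int)
  | _, [], p => p
  | 0, _ :: _, p => p
  | f + 1, v :: Q, p => pvLoopA G f (Q ++ pvAdj G v) (pvUpd G p v)

def find_all_parents (G : List (Int × List Int)) (s : Int) : List (Int × List Int) :=
  (pvLoopA G (pvFuel G) [s] PySem.Dict.empty).items

-- ===== PORT B =====
-- Stage 1: `while queue: v = queue.popleft(); if v not in seen: seen.add(v);
--           order.append(v); queue.extend(G.get(v, []))` — BFS order of reachable nodes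
-- (fuel makes the while-loop total; pvFuel is a generous upper bound on its pops)
def pvLoopOrder (G : List (Int × List Int)) :
    Nat → List Int → PySem.Set Int → List Int → List Int
  | _, [], _, order => order
  | 0, _ :: _, _, order => order
  | f + 1, v :: Q, seen, order =>
    if PySem.Set.contains seen v then pvLoopOrder G f Q seen order
    else pvLoopOrder G f (Q ++ pvAdj G v) (PySem.Set.add seen v) (order ++ [v])

-- Stage 2 body: `for w in G.get(v, []): parents[w].add(v)` (defaultdict access, set add)
def pvBuild (G : List (Int × List Int)) (p : PySem.Dict Int (PySem.Set Int)) (v : Int) :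
    PySem.Dict Int (PySem.Set Int) :=
  (pvAdj G v).foldl
    (fun p w => p.insert w (PySem.Set.add (p.getD w PySem.Set.empty) v)) p

def find_all_parents_alt (G : List (Int × List Int)) (s : Int) : List (Int × List Int) :=
  ((pvLoopOrder G (pvFuel G) [s] PySem.Set.empty []).foldl (pvBuild G) PySem.Dict.empty).items

-- ===== PRECONDITION & SPEC =====
-- nodes reachable from s: saturate {s} under one-step successors (fixpoint within pvK iterations)
def pvGrow (G : List (Int × List Int)) (S : List Int) : List Int :=
  PySem.Set.update S (S.flatMap (pvAdj G))
def pvReach (G : List (Int × List Int)) (s : Int) : List Int := (pvGrow G)^[pvK G] [s]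
-- peel off nodes all of whose successors are already peeled; on an acyclic reachable part
-- this removes every reachable node
def pvPeelStep (G : List (Int × List Int)) (reach : List Int) (rem : List Int) : List Int :=
  rem ++ reach.filter (fun v => !(rem.contains v) && (pvAdj G v).all (fun w => rem.contains w))
def pvPeel (G : List (Int × List Int)) (s : Int) : List Int :=
  (pvPeelStep G (pvReach G s))^[pvK G + 1] []

-- Pre_ excludes exactly the inputs where a cycle is reachable from s: there Python A loops
-- forever (never returns).  It holds iff the part of G reachable from s is acyclic.
def Pre_find_all_parents (G : List (Int × List Int)) (s : Int) : Prop :=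
  ∀ v ∈ pvReach G s, v ∈ pvPeel G s
instance (G : List (Int × List Int)) (s : Int) : Decidable (Pre_find_all_parents G s) := by
  unfold Pre_find_all_parents; infer_instance

def pvWitness_find_all_parents : (List (Int × List Int)) × Int :=
  ([(0, [1, 2]), (1, [2]), (2, [])], 0)

def Spec_find_all_parents (G : List (Int × List Int)) (s : Int) (out : List (Int × List Int)) : Prop := out = find_all_parents_alt G s
instance (G : List (Int × List Int)) (s : Int) (out : List (Int × List Int)) : Decidable (Spec_find_all_parents G s out) := by unfold Spec_find_all_parents; infer_instance

-- ===== CLAIM (what is proved, stated in full; the proofs are below) =====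
def Claim_equal_find_all_parents : Prop := ∀ (G : List (Int × List Int)) (s : Int), Dom_find_all_parents G s → Pre_find_all_parents G s → Spec_find_all_parents G s (find_all_parents G s)

-- ===== LEMMAS AND PROOFS =====

-- ---- generic dictionary facts ----

theorem pvDict_insert_noop {k : Int} {v : PySem.Set Int} (d : PySem.Dict Int (PySem.Set Int))
    (hnd : d.keys.Nodup) (h : d.get? k = some v) : d.insert k v = d := by
  apply PySem.Dict.ext
  have hc : d.contains k = true := by
    rw [PySem.Dict.contains_eq_isSome_get?, h]; rfl
  rw [PySem.Dict.items_insert_of_contains d v hc]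
  have key : ∀ q ∈ d.items, (if (q.1 == k) = true then ((k, v) : Int × PySem.Set Int) else q) = q := by
    intro q hq
    by_cases hqk : q.1 = k
    · obtain ⟨q1, q2⟩ := q
      simp only at hqk
      subst hqk
      have := PySem.Dict.get?_of_mem_items d hq hnd
      rw [h] at this
      simp [Option.some.injEq] at this
      simp [this]
    · simp [hqk]
  calc (d.items.map fun p => if (p.1 == k) = true then (k, v) else p) = d.items.map id :=
        List.map_congr_left (by intro q hq; simpa using key q hq)
    _ = d.items := List.map_id d.items

-- A's per-pop dict update equals B's stage-2 body
theorem pvUpd_eq_build (G : List (Int × List Int)) (p : PySem.Dict Int (PySem.Set Int))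
    (v : Int) : pvUpd G p v = pvBuild G p v := rfl

-- "processing v again changes nothing": every successor already has v recorded
def pvSat (G : List (Int × List Int)) (p : PySem.Dict Int (PySem.Set Int)) (v : Int) : Prop :=
  ∀ w ∈ pvAdj G v, ∃ S, p.get? w = some S ∧ v ∈ S

-- pointwise growth order on parent dictionaries
def pvDLe (p p' : PySem.Dict Int (PySem.Set Int)) : Prop :=
  ∀ w S, p.get? w = some S → ∃ S', p'.get? w = some S' ∧ S ⊆ S'

theorem pvDLe_refl (p : PySem.Dict Int (PySem.Set Int)) : pvDLe p p :=
  fun _ S h => ⟨S, h, List.Subset.refl S⟩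

theorem pvDLe_trans {p q r : PySem.Dict Int (PySem.Set Int)} (h1 : pvDLe p q) (h2 : pvDLe q r) :
    pvDLe p r := by
  intro w S h
  obtain ⟨S', hS', hsub⟩ := h1 w S h
  obtain ⟨S'', hS'', hsub'⟩ := h2 w S' hS'
  exact ⟨S'', hS'', hsub.trans hsub'⟩

theorem pvSet_subset_add (S : PySem.Set Int) (v : Int) : S ⊆ PySem.Set.add S v := by
  intro x hx; rw [PySem.Set.mem_add]; exact Or.inl hx

theorem pvDLe_step (p : PySem.Dict Int (PySem.Set Int)) (w v : Int) :
    pvDLe p (p.insert w (PySem.Set.add (p.getD w PySem.Set.empty) v)) := by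
  intro w' S h
  rw [PySem.Dict.get?_insert]
  by_cases hw : w' = w
  · subst hw
    refine ⟨PySem.Set.add (p.getD w' PySem.Set.empty) v, by simp, ?_⟩
    rw [PySem.Dict.getD_eq_get?_getD, h]
    exact pvSet_subset_add S v
  · simp only [hw, if_false]
    exact ⟨S, h, List.Subset.refl S⟩

theorem pvFold_le (v : Int) :
    ∀ (L : List Int) (p : PySem.Dict Int (PySem.Set Int)),
      pvDLe p (L.foldl (fun p w => p.insert w (PySem.Set.add (p.getD w PySem.Set.empty) v)) p)
  | [], p => pvDLe_refl p
  | a :: L, p => by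
    simp only [List.foldl_cons]
    exact pvDLe_trans (pvDLe_step p a v) (pvFold_le v L _)

theorem pvFold_mem (v : Int) :
    ∀ (L : List Int) (p : PySem.Dict Int (PySem.Set Int)) (w : Int), w ∈ L →
      ∃ S, (L.foldl (fun p w => p.insert w (PySem.Set.add (p.getD w PySem.Set.empty) v)) p).get? w
            = some S ∧ v ∈ S
  | [], _, _, h => absurd h (List.not_mem_nil)
  | a :: L, p, w, h => by
    simp only [List.foldl_cons]
    rcases List.mem_cons.mp h with rfl | hL
    · by_cases hmem : w ∈ L
      · exact pvFold_mem v L _ w hmem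
      · obtain ⟨S', hS', hsub⟩ := pvFold_le v L (p.insert w (PySem.Set.add (p.getD w PySem.Set.empty) v)) w
          (PySem.Set.add (p.getD w PySem.Set.empty) v) (by simp)
        exact ⟨S', hS', hsub (by rw [PySem.Set.mem_add]; exact Or.inr rfl)⟩
    · exact pvFold_mem v L _ w hL

theorem pvDLe_upd (G : List (Int × List Int)) (p : PySem.Dict Int (PySem.Set Int)) (v : Int) :
    pvDLe p (pvUpd G p v) := pvFold_le v (pvAdj G v) p

theorem pvSat_upd (G : List (Int × List Int)) (p : PySem.Dict Int (PySem.Set Int)) (v : Int) :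
    pvSat G (pvUpd G p v) v := fun w hw => pvFold_mem v (pvAdj G v) p w hw

theorem pvSat_mono {G : List (Int × List Int)} {p p' : PySem.Dict Int (PySem.Set Int)} {v : Int}
    (h : pvSat G p v) (hle : pvDLe p p') : pvSat G p' v := by
  intro w hw
  obtain ⟨S, hS, hv⟩ := h w hw
  obtain ⟨S', hS', hsub⟩ := hle w S hS
  exact ⟨S', hS', hsub hv⟩

theorem pvSet_add_noop {S : PySem.Set Int} {v : Int} (h : v ∈ S) : PySem.Set.add S v = S := by
  unfold PySem.Set.add
  rw [if_pos ((PySem.Set.contains_iff S v).mpr h)]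

theorem pvFold_noop (v : Int) :
    ∀ (L : List Int) (p : PySem.Dict Int (PySem.Set Int)), p.keys.Nodup →
      (∀ w ∈ L, ∃ S, p.get? w = some S ∧ v ∈ S) →
      L.foldl (fun p w => p.insert w (PySem.Set.add (p.getD w PySem.Set.empty) v)) p = p
  | [], p, _, _ => rfl
  | a :: L, p, hnd, h => by
    obtain ⟨S, hS, hv⟩ := h a (List.mem_cons_self)
    have hstep : p.insert a (PySem.Set.add (p.getD a PySem.Set.empty) v) = p := by
      rw [PySem.Dict.getD_eq_get?_getD, hS]
      show p.insert a (PySem.Set.add S v) = p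
      rw [pvSet_add_noop hv]
      exact pvDict_insert_noop p hnd hS
    simp only [List.foldl_cons, hstep]
    exact pvFold_noop v L p hnd (fun w hw => h w (List.mem_cons_of_mem a hw))

theorem pvUpd_noop {G : List (Int × List Int)} {p : PySem.Dict Int (PySem.Set Int)} {v : Int}
    (hnd : p.keys.Nodup) (h : pvSat G p v) : pvUpd G p v = p :=
  pvFold_noop v (pvAdj G v) p hnd h

theorem pvKN_upd (G : List (Int × List Int)) (p : PySem.Dict Int (PySem.Set Int)) (v : Int)
    (hnd : p.keys.Nodup) : (pvUpd G p v).keys.Nodup :=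
  PySem.Dict.nodup_keys_foldl_insert (pvAdj G v)
    (fun p w => PySem.Set.add (p.getD w PySem.Set.empty) v) p hnd

-- ---- B's order loop: the accumulator distributes ----

theorem pvLoopOrder_acc (G : List (Int × List Int)) :
    ∀ (f : Nat) (Q : List Int) (seen : PySem.Set Int) (order : List Int),
      pvLoopOrder G f Q seen order = order ++ pvLoopOrder G f Q seen [] := by
  intro f
  induction f with
  | zero => intro Q seen order; cases Q <;> simp [pvLoopOrder]
  | succ f ih =>
    intro Q seen order
    cases Q with
    | nil => simp [pvLoopOrder]
    | cons v Q' =>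
      show (if PySem.Set.contains seen v then _ else _) = order ++ (if PySem.Set.contains seen v then _ else _)
      by_cases h : PySem.Set.contains seen v = true
      · rw [if_pos h, if_pos h]; exact ih Q' seen order
      · rw [if_neg h, if_neg h]
        simp only [List.nil_append]
        rw [ih (Q' ++ pvAdj G v) (PySem.Set.add seen v) (order ++ [v]),
            ih (Q' ++ pvAdj G v) (PySem.Set.add seen v) [v]]
        simp

-- ---- queue coupling: A's queue covers B's queue ----

-- pvCov vis seen QA QB: A's remaining queue QA is B's remaining queue QB with extra
-- elements interleaved, each extra being already visited or matched earlier (in seen).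
inductive pvCov (vis : List Int) : List Int → List Int → List Int → Prop
  | nil (seen : List Int) : pvCov vis seen [] []
  | cons (seen : List Int) (v : Int) (qa qb : List Int) :
      pvCov vis (v :: seen) qa qb → pvCov vis seen (v :: qa) (v :: qb)
  | extra (seen : List Int) (v : Int) (qa qb : List Int) :
      (v ∈ vis ∨ v ∈ seen) → pvCov vis seen qa qb → pvCov vis seen (v :: qa) qb

theorem pvCov_mono {vis vis' seen seen' qa qb : List Int} (h : pvCov vis seen qa qb)
    (hsub : ∀ x, (x ∈ vis ∨ x ∈ seen) → (x ∈ vis' ∨ x ∈ seen')) :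
    pvCov vis' seen' qa qb := by
  induction h generalizing seen' with
  | nil => exact pvCov.nil seen'
  | cons seen v qa qb _ ih =>
    exact pvCov.cons seen' v qa qb (ih (by
      intro x hx
      rcases hx with hx | hx
      · rcases hsub x (Or.inl hx) with h' | h'
        · exact Or.inl h'
        · exact Or.inr (List.mem_cons_of_mem v h')
      · rcases List.mem_cons.mp hx with rfl | hx
        · exact Or.inr List.mem_cons_self
        · rcases hsub x (Or.inr hx) with h' | h'
          · exact Or.inl h'
          · exact Or.inr (List.mem_cons_of_mem v h')))
  | extra seen v qa qb hv _ ih =>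
    exact pvCov.extra seen' v qa qb (hsub v hv) (ih hsub)

theorem pvCov_refl (vis : List Int) : ∀ (L seen : List Int), pvCov vis seen L L
  | [], seen => pvCov.nil seen
  | a :: L, seen => pvCov.cons seen a L L (pvCov_refl vis L (a :: seen))

theorem pvCov_append_eq {vis seen qa qb : List Int} (h : pvCov vis seen qa qb) (L : List Int) :
    pvCov vis seen (qa ++ L) (qb ++ L) := by
  induction h with
  | nil seen => simpa using pvCov_refl vis L seen
  | cons seen v qa qb _ ih => exact pvCov.cons seen v _ _ ih
  | extra seen v qa qb hv _ ih => exact pvCov.extra seen v _ _ hv ih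

theorem pvCov_extras (vis : List Int) :
    ∀ (L seen : List Int), (∀ e ∈ L, e ∈ vis ∨ e ∈ seen) → pvCov vis seen L []
  | [], seen, _ => pvCov.nil seen
  | a :: L, seen, h =>
    pvCov.extra seen a L [] (h a List.mem_cons_self)
      (pvCov_extras vis L seen (fun e he => h e (List.mem_cons_of_mem a he)))

theorem pvCov_append_extras {vis seen qa qb : List Int} (h : pvCov vis seen qa qb) {L : List Int}
    (hL : ∀ e ∈ L, e ∈ vis ∨ e ∈ seen ∨ e ∈ qb) : pvCov vis seen (qa ++ L) qb := by
  induction h with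
  | nil seen =>
    simp only [List.nil_append]
    exact pvCov_extras vis L seen (by
      intro e he
      rcases hL e he with h' | h' | h'
      · exact Or.inl h'
      · exact Or.inr h'
      · exact absurd h' (List.not_mem_nil))
  | cons seen v qa qb _ ih =>
    refine pvCov.cons seen v _ _ (ih ?_)
    intro e he
    rcases hL e he with h' | h' | h'
    · exact Or.inl h'
    · exact Or.inr (Or.inl (List.mem_cons_of_mem v h'))
    · rcases List.mem_cons.mp h' with rfl | h'
      · exact Or.inr (Or.inl List.mem_cons_self)
      · exact Or.inr (Or.inr h')
  | extra seen v qa qb hv _ ih => exact pvCov.extra seen v _ _ hv (ih hL)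

-- ---- A's termination predicate (the dictionary plays no role in control flow) ----

def pvDoneA (G : List (Int × List Int)) : Nat → List Int → Bool
  | _, [] => true
  | 0, _ :: _ => false
  | f + 1, v :: Q => pvDoneA G f (Q ++ pvAdj G v)

-- ---- the coupling lemma: A's walk-enumerating dict loop equals the fold of A's update
--      over B's visited-BFS processing order ----

theorem pvCouple (G : List (Int × List Int)) :
    ∀ (fA : Nat) (fB : Nat) (QA QB : List Int) (vis : PySem.Set Int)
      (p : PySem.Dict Int (PySem.Set Int)),
      fA ≤ fB → pvDoneA G fA QA = true → p.keys.Nodup →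
      (∀ v ∈ vis, pvSat G p v) →
      (∀ v ∈ vis, ∀ w ∈ pvAdj G v, w ∈ vis ∨ w ∈ QB) →
      pvCov vis [] QA QB →
      pvLoopA G fA QA p = (pvLoopOrder G fB QB vis []).foldl (pvUpd G) p := by
  intro fA
  induction fA with
  | zero =>
    intro fB QA QB vis p _ hdone hnd h1 h3 hcov
    cases QA with
    | nil =>
      cases hcov with
      | nil => cases fB <;> rfl
    | cons v Q => simp [pvDoneA] at hdone
  | succ f ih =>
    intro fB QA QB vis p hle hdone hnd h1 h3 hcov
    cases QA with
    | nil =>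
      cases hcov with
      | nil => cases fB <;> rfl
    | cons v QA' =>
      have hdone' : pvDoneA G f (QA' ++ pvAdj G v) = true := hdone
      obtain ⟨fB', rfl⟩ : ∃ fB', fB = fB' + 1 := ⟨fB - 1, by omega⟩
      cases hcov with
      | extra seen v' qa' QB2 hv hcov' =>
        -- v is an extra element of A's queue: v ∈ vis, B's queue untouched
        have hvvis : v ∈ vis := by simpa using hv
        have hstep : pvLoopA G (f + 1) (v :: QA') p = pvLoopA G f (QA' ++ pvAdj G v) p := by
          show pvLoopA G f (QA' ++ pvAdj G v) (pvUpd G p v) = _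
          rw [pvUpd_noop hnd (h1 v hvvis)]
        rw [hstep]
        refine ih (fB' + 1) (QA' ++ pvAdj G v) QB vis p (by omega) hdone' hnd h1 h3 ?_
        refine pvCov_append_extras hcov' ?_
        intro e he
        rcases h3 v hvvis e he with h' | h'
        · exact Or.inl h'
        · exact Or.inr (Or.inr h')
      | cons seen v' qa' QB' hcov' =>
        -- heads match; QB = v :: QB'
        by_cases hvvis : v ∈ vis
        · -- B skips v
          have hB : pvLoopOrder G (fB' + 1) (v :: QB') vis [] = pvLoopOrder G fB' QB' vis [] := by
            show (if PySem.Set.contains vis v then _ else _) = _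
            rw [if_pos ((PySem.Set.contains_iff vis v).mpr hvvis)]
          have hstep : pvLoopA G (f + 1) (v :: QA') p = pvLoopA G f (QA' ++ pvAdj G v) p := by
            show pvLoopA G f (QA' ++ pvAdj G v) (pvUpd G p v) = _
            rw [pvUpd_noop hnd (h1 v hvvis)]
          rw [hB, hstep]
          refine ih fB' (QA' ++ pvAdj G v) QB' vis p (by omega) hdone' hnd h1 ?_ ?_
          · intro u hu w hw
            rcases h3 u hu w hw with h' | h'
            · exact Or.inl h'
            · rcases List.mem_cons.mp h' with rfl | h'
              · exact Or.inl hvvis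
              · exact Or.inr h'
          · refine pvCov_mono (pvCov_append_extras hcov' ?_) ?_
            · intro e he
              rcases h3 v hvvis e he with h' | h'
              · exact Or.inl h'
              · rcases List.mem_cons.mp h' with rfl | h'
                · exact Or.inl hvvis
                · exact Or.inr (Or.inr h')
            · intro x hx
              rcases hx with h' | h'
              · exact Or.inl h'
              · rcases List.mem_cons.mp h' with rfl | h'
                · exact Or.inl hvvis
                · exact absurd h' (List.not_mem_nil)
        · -- B processes v: its order gains v, and folding pvUpd over [v] is A's dict step
          have hB : pvLoopOrder G (fB' + 1) (v :: QB') vis []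
              = v :: pvLoopOrder G fB' (QB' ++ pvAdj G v) (PySem.Set.add vis v) [] := by
            show (if PySem.Set.contains vis v then _ else _) = _
            rw [if_neg (by
              intro hc
              exact hvvis ((PySem.Set.contains_iff vis v).mp hc))]
            simp only [List.nil_append]
            rw [pvLoopOrder_acc G fB' (QB' ++ pvAdj G v) (PySem.Set.add vis v) [v]]
            rfl
          have hA : pvLoopA G (f + 1) (v :: QA') p
              = pvLoopA G f (QA' ++ pvAdj G v) (pvUpd G p v) := rfl
          rw [hA, hB]
          simp only [List.foldl_cons]
          refine ih fB' (QA' ++ pvAdj G v) (QB' ++ pvAdj G v) (PySem.Set.add vis v)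
            (pvUpd G p v) (by omega) hdone' (pvKN_upd G p v hnd) ?_ ?_ ?_
          · intro u hu
            rcases (PySem.Set.mem_add vis v u).mp hu with h' | rfl
            · exact pvSat_mono (h1 u h') (pvDLe_upd G p v)
            · exact pvSat_upd G p u
          · intro u hu w hw
            rcases (PySem.Set.mem_add vis v u).mp hu with h' | rfl
            · rcases h3 u h' w hw with h'' | h''
              · exact Or.inl ((PySem.Set.mem_add vis v w).mpr (Or.inl h''))
              · rcases List.mem_cons.mp h'' with rfl | h''
                · exact Or.inl ((PySem.Set.mem_add vis w w).mpr (Or.inr rfl))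
                · exact Or.inr (List.mem_append_left _ h'')
            · exact Or.inr (List.mem_append_right _ hw)
          · refine pvCov_append_eq (pvCov_mono hcov' ?_) (pvAdj G v)
            intro x hx
            rcases hx with h' | h'
            · exact Or.inl ((PySem.Set.mem_add vis v x).mpr (Or.inl h'))
            · rcases List.mem_cons.mp h' with rfl | h'
              · exact Or.inl ((PySem.Set.mem_add vis x x).mpr (Or.inr rfl))
              · exact absurd h' (List.not_mem_nil)

-- ---- reachability, peeling ranks, and fuel sufficiency ----

def pvUniv (G : List (Int × List Int)) (s : Int) : List Int :=
  s :: G.flatMap (fun q => q.2)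

theorem pvAdj_subset {G : List (Int × List Int)} {v w : Int} (h : w ∈ pvAdj G v) :
    w ∈ G.flatMap (fun q => q.2) := by
  unfold pvAdj at h
  rw [PySem.Dict.getD_eq_get?_getD] at h
  cases hg : (PySem.Dict.mk G).get? v with
  | none => rw [hg] at h; exact absurd h (List.not_mem_nil)
  | some l =>
    rw [hg] at h
    have hmem : (v, l) ∈ (PySem.Dict.mk G).items := PySem.Dict.mem_items_of_get?_eq_some _ hg
    exact List.mem_flatMap.mpr ⟨(v, l), hmem, h⟩

theorem pvAdj_length {G : List (Int × List Int)} (v : Int) : (pvAdj G v).length ≤ pvE G := by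
  unfold pvAdj
  rw [PySem.Dict.getD_eq_get?_getD]
  cases hg : (PySem.Dict.mk G).get? v with
  | none => simp [pvE]
  | some l =>
    have hmem : (v, l) ∈ (PySem.Dict.mk G).items := PySem.Dict.mem_items_of_get?_eq_some _ hg
    have : l.length ∈ G.map (fun q => q.2.length) := List.mem_map.mpr ⟨(v, l), hmem, rfl⟩
    simpa [pvE] using List.le_sum_of_mem this

theorem pvNodup_length_le {l l' : List Int} (h : l.Nodup) (hs : l ⊆ l') :
    l.length ≤ l'.length := by
  classical
  calc l.length = l.toFinset.card := (List.toFinset_card_of_nodup h).symm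
    _ ≤ l'.toFinset.card := Finset.card_le_card (by intro x hx; simp at hx ⊢; exact hs hx)
    _ ≤ l'.length := l'.toFinset_card_le

theorem pvUpdate_append (s : PySem.Set Int) (xs : List Int) :
    ∃ ext, PySem.Set.update s xs = s ++ ext := by
  induction xs generalizing s with
  | nil => exact ⟨[], by simp [PySem.Set.update]⟩
  | cons a xs ih =>
    show ∃ ext, PySem.Set.update (PySem.Set.add s a) xs = s ++ ext
    unfold PySem.Set.add
    split
    · exact ih s
    · obtain ⟨ext, hext⟩ := ih (s ++ [a])
      exact ⟨[a] ++ ext, by rw [hext, List.append_assoc]⟩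

theorem pvGrow_ext (G : List (Int × List Int)) (S : List Int) : ∃ ext, pvGrow G S = S ++ ext :=
  pvUpdate_append S _

theorem pvGrow_subset (G : List (Int × List Int)) (S : List Int) : S ⊆ pvGrow G S := by
  obtain ⟨ext, hext⟩ := pvGrow_ext G S
  rw [hext]; exact List.subset_append_left S ext

theorem pvMem_grow {G : List (Int × List Int)} {S : List Int} {y : Int} :
    y ∈ pvGrow G S ↔ y ∈ S ∨ y ∈ S.flatMap (pvAdj G) := PySem.Set.mem_update S _ y

theorem pvGrow_inv (G : List (Int × List Int)) (s : Int) {S : List Int}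
    (h : S.Nodup ∧ S ⊆ pvUniv G s) : (pvGrow G S).Nodup ∧ pvGrow G S ⊆ pvUniv G s := by
  refine ⟨PySem.Set.nodup_update S _ h.1, ?_⟩
  intro x hx
  rcases pvMem_grow.mp hx with h' | h'
  · exact h.2 h'
  · obtain ⟨v, _, hadj⟩ := List.mem_flatMap.mp h'
    exact List.mem_cons_of_mem s (pvAdj_subset hadj)

theorem pvIter_inv {α : Type} {f : α → α} {P : α → Prop} (hf : ∀ a, P a → P (f a)) :
    ∀ (n : Nat) (a : α), P a → P (f^[n] a)
  | 0, a, h => h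
  | n + 1, a, h => by
    rw [Function.iterate_succ_apply']
    exact hf _ (pvIter_inv hf n a h)

theorem pvUniv_length (G : List (Int × List Int)) (s : Int) :
    (pvUniv G s).length = pvE G + 1 := by
  simp [pvUniv, List.length_flatMap, pvE]

theorem pvFix (G : List (Int × List Int)) (s : Int) :
    ∀ (n : Nat) (S : List Int), S.Nodup → S ⊆ pvUniv G s →
      (pvUniv G s).length ≤ n + S.length →
      pvGrow G ((pvGrow G)^[n] S) = (pvGrow G)^[n] S := by
  intro n
  induction n with
  | zero =>
    intro S hnd hsub hlen
    simp only [Function.iterate_zero, id_eq]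
    obtain ⟨ext, hext⟩ := pvGrow_ext G S
    obtain ⟨hnd', hsub'⟩ := pvGrow_inv G s ⟨hnd, hsub⟩
    have := pvNodup_length_le hnd' hsub'
    rw [hext] at this ⊢
    rw [List.length_append] at this
    have : ext = [] := List.eq_nil_of_length_eq_zero (by omega)
    rw [this, List.append_nil]
  | succ n ih =>
    intro S hnd hsub hlen
    by_cases hfix : pvGrow G S = S
    · rw [Function.iterate_fixed hfix, hfix]
    · rw [Function.iterate_succ_apply]
      obtain ⟨ext, hext⟩ := pvGrow_ext G S
      obtain ⟨hnd', hsub'⟩ := pvGrow_inv G s ⟨hnd, hsub⟩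
      have hne : ext ≠ [] := by
        intro h; rw [h, List.append_nil] at hext; exact hfix hext
      refine ih (pvGrow G S) hnd' hsub' ?_
      rw [hext, List.length_append]
      have : 1 ≤ ext.length := List.length_pos_of_ne_nil hne
      omega

theorem pvReach_fix (G : List (Int × List Int)) (s : Int) :
    pvGrow G (pvReach G s) = pvReach G s := by
  refine pvFix G s (pvK G) [s] (List.nodup_cons.mpr ⟨List.not_mem_nil, List.nodup_nil⟩)
    (by intro x hx; rcases List.mem_cons.mp hx with rfl | h
        · exact List.mem_cons_self
        · exact absurd h (List.not_mem_nil)) ?_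
  rw [pvUniv_length]
  simp [pvK]

theorem pvReach_closed {G : List (Int × List Int)} {s v w : Int} (hv : v ∈ pvReach G s)
    (hw : w ∈ pvAdj G v) : w ∈ pvReach G s := by
  rw [← pvReach_fix G s]
  exact pvMem_grow.mpr (Or.inr (List.mem_flatMap.mpr ⟨v, hv, hw⟩))

theorem pvS_mem_reach (G : List (Int × List Int)) (s : Int) : s ∈ pvReach G s := by
  have : [s] ⊆ pvReach G s := by
    unfold pvReach
    generalize pvK G = n
    induction n with
    | zero => simp
    | succ n ih =>
      rw [Function.iterate_succ_apply']
      exact fun x hx => pvGrow_subset G _ (ih hx)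
  exact this List.mem_cons_self

-- ---- peel ranks ----

def pvRank (G : List (Int × List Int)) (s : Int) (v : Int) : Nat :=
  (List.range (pvK G + 2)).findIdx
    (fun k => decide (v ∈ (pvPeelStep G (pvReach G s))^[k] []))

theorem pvRank_le {G : List (Int × List Int)} {s v : Int} {k : Nat} (_hk : k < pvK G + 2)
    (h : v ∈ (pvPeelStep G (pvReach G s))^[k] []) : pvRank G s v ≤ k := by
  by_contra hlt
  have hklt : k < (List.range (pvK G + 2)).findIdx
      (fun k => decide (v ∈ (pvPeelStep G (pvReach G s))^[k] [])) := by
    unfold pvRank at hlt; omega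
  have hf := List.not_of_lt_findIdx hklt
  rw [List.getElem_range] at hf
  simp [h] at hf

theorem pvRank_mem {G : List (Int × List Int)} {s v : Int} (h : v ∈ pvPeel G s) :
    v ∈ (pvPeelStep G (pvReach G s))^[pvRank G s v] [] ∧ pvRank G s v ≤ pvK G + 1 := by
  have hle : pvRank G s v ≤ pvK G + 1 := pvRank_le (by omega) h
  refine ⟨?_, hle⟩
  have hlt : pvRank G s v < (List.range (pvK G + 2)).length := by
    rw [List.length_range]; omega
  have hf := List.findIdx_getElem (p := fun k => decide (v ∈ (pvPeelStep G (pvReach G s))^[k] []))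
    (xs := List.range (pvK G + 2)) (w := hlt)
  rw [List.getElem_range] at hf
  simpa [pvRank] using hf

theorem pvRank_pos {G : List (Int × List Int)} {s v : Int} (h : v ∈ pvPeel G s) :
    0 < pvRank G s v := by
  rcases Nat.eq_zero_or_pos (pvRank G s v) with h' | h'
  · exfalso
    have := (pvRank_mem h).1
    rw [h'] at this
    simp at this
  · exact h'

theorem pvRank_adj {G : List (Int × List Int)} {s : Int}
    (hpre : Pre_find_all_parents G s) {v w : Int} (hv : v ∈ pvReach G s)
    (hw : w ∈ pvAdj G v) : pvRank G s w < pvRank G s v := by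
  have hvp : v ∈ pvPeel G s := hpre v hv
  obtain ⟨hmem, hle⟩ := pvRank_mem hvp
  obtain ⟨j, hj⟩ : ∃ j, pvRank G s v = j + 1 := ⟨pvRank G s v - 1, by have := pvRank_pos hvp; omega⟩
  rw [hj, Function.iterate_succ_apply'] at hmem
  have hvrem : v ∉ (pvPeelStep G (pvReach G s))^[j] [] := by
    intro hvj
    have := pvRank_le (k := j) (by omega) hvj
    omega
  rcases List.mem_append.mp hmem with h' | h'
  · exact absurd h' hvrem
  · obtain ⟨_, hcond⟩ := List.mem_filter.mp h'
    simp only [Bool.and_eq_true, List.all_eq_true, List.contains_eq_mem, decide_eq_true_eq] at hcond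
    have hwj : w ∈ (pvPeelStep G (pvReach G s))^[j] [] := hcond.2 w hw
    have := pvRank_le (k := j) (by omega) hwj
    omega

-- ---- fuel sufficiency ----

def pvPhi (G : List (Int × List Int)) (s : Int) (Q : List Int) : Nat :=
  (Q.map (fun v => pvK G ^ pvRank G s v)).sum

theorem pvSum_le {l : List Nat} {n : Nat} (h : ∀ x ∈ l, x ≤ n) : l.sum ≤ l.length * n := by
  induction l with
  | nil => simp
  | cons a t ih => simp_all [Nat.succ_mul]; omega

theorem pvAdjSum (G : List (Int × List Int)) (s : Int) (hpre : Pre_find_all_parents G s)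
    {v : Int} (hv : v ∈ pvReach G s) :
    ((pvAdj G v).map (fun w => pvK G ^ pvRank G s w)).sum + 1 ≤ pvK G ^ pvRank G s v := by
  have hK : 2 ≤ pvK G := by unfold pvK; omega
  cases hadj : pvAdj G v with
  | nil => simpa using Nat.one_le_pow _ _ (by omega)
  | cons a L =>
    have hr : 0 < pvRank G s v := pvRank_pos (hpre v hv)
    obtain ⟨r, hrv⟩ : ∃ r, pvRank G s v = r + 1 := ⟨pvRank G s v - 1, by omega⟩
    have hterm : ∀ x ∈ (pvAdj G v).map (fun w => pvK G ^ pvRank G s w), x ≤ pvK G ^ r := by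
      intro x hx
      obtain ⟨w, hw, rfl⟩ := List.mem_map.mp hx
      have : pvRank G s w < pvRank G s v := pvRank_adj hpre hv hw
      exact Nat.pow_le_pow_right (by omega) (by omega)
    have hsum := pvSum_le hterm
    have hlen : ((pvAdj G v).map (fun w => pvK G ^ pvRank G s w)).length ≤ pvK G - 2 := by
      rw [List.length_map]
      have := pvAdj_length (G := G) v
      simp [pvK]; omega
    have hpow : 0 < pvK G ^ r := Nat.pow_pos (by omega)
    have : ((pvAdj G v).map (fun w => pvK G ^ pvRank G s w)).sum ≤ (pvK G - 2) * pvK G ^ r :=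
      le_trans hsum (Nat.mul_le_mul_right _ hlen)
    rw [hrv, pow_succ]
    have h2 : (pvK G - 2) * pvK G ^ r + 2 * pvK G ^ r = pvK G * pvK G ^ r := by
      have he : pvK G - 2 + 2 = pvK G := by omega
      calc (pvK G - 2) * pvK G ^ r + 2 * pvK G ^ r = (pvK G - 2 + 2) * pvK G ^ r := by ring
        _ = pvK G * pvK G ^ r := by rw [he]
    have hcomm : pvK G ^ r * pvK G = pvK G * pvK G ^ r := Nat.mul_comm _ _
    rw [← hadj] at *
    omega

theorem pvDone_of_phi (G : List (Int × List Int)) (s : Int) (hpre : Pre_find_all_parents G s) :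
    ∀ (f : Nat) (Q : List Int), (∀ v ∈ Q, v ∈ pvReach G s) → pvPhi G s Q < f →
      pvDoneA G f Q = true := by
  intro f
  induction f with
  | zero => intro Q _ h; exact absurd h (by omega)
  | succ f ih =>
    intro Q hmem hphi
    cases Q with
    | nil => rfl
    | cons v Q' =>
      show pvDoneA G f (Q' ++ pvAdj G v) = true
      refine ih (Q' ++ pvAdj G v) ?_ ?_
      · intro w hw
        rcases List.mem_append.mp hw with h' | h'
        · exact hmem w (List.mem_cons_of_mem v h')
        · exact pvReach_closed (hmem v List.mem_cons_self) h'
      · have hv : v ∈ pvReach G s := hmem v List.mem_cons_self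
        have := pvAdjSum G s hpre hv
        unfold pvPhi at hphi ⊢
        rw [List.map_append, List.sum_append]
        simp only [List.map_cons, List.sum_cons] at hphi
        omega

theorem pvDoneA_suff (G : List (Int × List Int)) (s : Int)
    (hpre : Pre_find_all_parents G s) : pvDoneA G (pvFuel G) [s] = true := by
  refine pvDone_of_phi G s hpre (pvFuel G) [s] ?_ ?_
  · intro v hv
    rcases List.mem_cons.mp hv with rfl | h
    · exact pvS_mem_reach G v
    · exact absurd h (List.not_mem_nil)
  · have hK : 2 ≤ pvK G := by unfold pvK; omega
    have hrs : pvRank G s s ≤ pvK G + 1 := (pvRank_mem (hpre s (pvS_mem_reach G s))).2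
    unfold pvPhi pvFuel
    simp only [List.map_cons, List.map_nil, List.sum_cons, List.sum_nil, Nat.add_zero]
    calc pvK G ^ pvRank G s s ≤ pvK G ^ (pvK G + 1) := Nat.pow_le_pow_right (by omega) hrs
      _ < pvK G ^ (pvK G + 2) := Nat.pow_lt_pow_right (by omega) (by omega)

-- ===== VERDICT (by name: the statement is the Claim_ definition above) =====

theorem find_all_parents_spec : Claim_equal_find_all_parents := by
  intro G s _hdom hpre
  unfold Spec_find_all_parents find_all_parents find_all_parents_alt
  congr 1
  have hfold : (pvLoopOrder G (pvFuel G) [s] PySem.Set.empty []).foldl (pvBuild G)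
      PySem.Dict.empty
      = (pvLoopOrder G (pvFuel G) [s] PySem.Set.empty []).foldl (pvUpd G)
        PySem.Dict.empty := by
    apply PySem.List.foldl_congr_mem
    intro p v _
    exact (pvUpd_eq_build G p v).symm
  rw [hfold]
  refine pvCouple G (pvFuel G) (pvFuel G) [s] [s] PySem.Set.empty PySem.Dict.empty
    (le_refl _) (pvDoneA_suff G s hpre) (by simp [PySem.Dict.keys_empty]) ?_ ?_ ?_
  · intro v hv; exact absurd hv (List.not_mem_nil)
  · intro v hv; exact absurd hv (List.not_mem_nil)
  · exact pvCov_refl _ [s] []
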